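-- pv_equiv track=rewrite | github.com/gammag4/RandomStuff | java_class_generator/java_class_generator.py | splitClasses
-- ===== SOURCE A (Python) =====
-- import string
--
-- def splitClasses(file):
-- 	lines = file.split('\n')
-- 	lines = list(filter(lambda x: x.strip(), lines))
--
-- 	classes = []
-- 	currLines = []
-- 	for line in lines:
-- 		if line[0] not in string.whitespace:
-- 			classes.append('\n'.join(currLines))
-- 			currLines = [line]
-- 		else:
-- 			currLines.append(line)
--
-- 	classes.append('\n'.join(currLines))
--
-- 	classes = list(filter(lambda x: x.strip(), classes))
-- 	return classes
-- ===== SOURCE B (Python) =====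
-- import string
--
-- def splitClasses(file):
-- 	lines = [l for l in file.split('\n') if l.strip()]
--
-- 	def indented(l):
-- 		return l[0] in string.whitespace
--
-- 	n = len(lines)
-- 	i = 0
-- 	while i < n and indented(lines[i]):
-- 		i += 1
-- 	head = lines[:i]
-- 	segs = [head] if head else []
-- 	while i < n:
-- 		j = i + 1
-- 		while j < n and indented(lines[j]):
-- 			j += 1
-- 		segs.append(lines[i:j])
-- 		i = j
-- 	return ['\n'.join(g) for g in segs]
-- ===== Notes on version B (the rewrite author's own statement) =====
-- stated objective: alternative
-- what changed: A threads a (classes, currLines) accumulator pair through one fold and filters blanks at the end; B first scans off the leading indented block as an optional head segment, then repeatedly takes a header line plus its following indented run (a span/grouping pass over indices), joining each segment, with no final filter.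
import Mathlib
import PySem

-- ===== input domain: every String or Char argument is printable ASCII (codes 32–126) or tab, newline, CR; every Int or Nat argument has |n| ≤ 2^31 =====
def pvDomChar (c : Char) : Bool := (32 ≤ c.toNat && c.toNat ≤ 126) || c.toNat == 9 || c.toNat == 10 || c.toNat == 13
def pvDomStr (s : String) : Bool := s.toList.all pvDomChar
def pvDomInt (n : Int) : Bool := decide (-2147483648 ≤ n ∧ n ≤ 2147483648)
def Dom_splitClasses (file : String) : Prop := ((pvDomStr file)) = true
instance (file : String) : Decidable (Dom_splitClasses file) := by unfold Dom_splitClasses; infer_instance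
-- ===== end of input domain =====

-- B replaces A's fold over a (classes, currLines) accumulator pair (plus final blank-filter) by a
-- span-based grouping: an optional leading indented segment, then header-plus-indented-run segments.

-- string.whitespace; 'line[0] in string.whitespace' is single-char substring membership = char membership (exact)
def pvWs (c : Char) : Bool := [' ', '\t', '\n', '\r', Char.ofNat 11, Char.ofNat 12].contains c

-- ===== PORT A =====
-- line[0] not in string.whitespace; the none branch (IndexError in Python) is unreachable: lines are non-blank
def pvHeaderA (line : String) : Bool :=
  match PySem.Str.pyGet? line 0 with
  | some c => !(pvWs c)
  | none => false

def splitClasses (file : String) : List String :=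
  let lines := ((PySem.Str.split? file "\n").getD []).filter (fun x => decide (PySem.Str.strip x ≠ ""))
  let st := lines.foldl (fun (st : List String × List String) line =>
      if pvHeaderA line then (st.1 ++ [PySem.Str.join "\n" st.2], [line])
      else (st.1, st.2 ++ [line])) ([], [])
  (st.1 ++ [PySem.Str.join "\n" st.2]).filter (fun x => decide (PySem.Str.strip x ≠ ""))

-- ===== PORT B =====
-- l[0] in string.whitespace; the none branch is unreachable (only applied to non-blank lines)
def pvIndented (line : String) : Bool :=
  match PySem.Str.pyGet? line 0 with
  | some c => pvWs c
  | none => false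

-- Source B's inner while loop: split off the maximal run of indented lines
def pvSpan : List String → List String × List String
  | [] => ([], [])
  | l :: t => if pvIndented l then ((pvSpan t).1.cons l, (pvSpan t).2) else ([], l :: t)

theorem pvSpan_snd_length (ls : List String) : (pvSpan ls).2.length ≤ ls.length := by
  induction ls with
  | nil => simp [pvSpan]
  | cons l t ih => simp only [pvSpan]; split <;> simp <;> omega

-- Source B's outer while loop: each segment is a header line plus its indented run
def pvGroups : List String → List (List String)
  | [] => []
  | l :: t => (l :: (pvSpan t).1) :: pvGroups (pvSpan t).2
termination_by ls => ls.length
decreasing_by have := pvSpan_snd_length t; simp; omega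

def splitClasses_alt (file : String) : List String :=
  let lines := ((PySem.Str.split? file "\n").getD []).filter (fun x => decide (PySem.Str.strip x ≠ ""))
  let p := pvSpan lines
  ((if p.1.isEmpty then [] else [p.1]) ++ pvGroups p.2).map (fun g => PySem.Str.join "\n" g)

-- ===== PRECONDITION & SPEC =====
def Spec_splitClasses (file : String) (out : List String) : Prop := out = splitClasses_alt file
instance (file : String) (out : List String) : Decidable (Spec_splitClasses file out) := by unfold Spec_splitClasses; infer_instance

-- ===== CLAIM (what is proved, stated in full; the proofs are below) =====
def Claim_equal_splitClasses : Prop := ∀ (file : String), Dom_splitClasses file → Spec_splitClasses file (splitClasses file)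

-- ===== LEMMAS AND PROOFS =====

theorem pvGroups_cons (l : String) (t : List String) :
    pvGroups (l :: t) = (l :: (pvSpan t).1) :: pvGroups (pvSpan t).2 := by
  rw [pvGroups.eq_def]

theorem pvSpan_eq (ls : List String) :
    pvSpan ls = (ls.takeWhile pvIndented, ls.dropWhile pvIndented) := by
  induction ls with
  | nil => simp [pvSpan]
  | cons l t ih => simp only [pvSpan, List.takeWhile, List.dropWhile, ih]; cases pvIndented l <;> simp

theorem pvStrip_nil_iff (cs : List Char) :
    PySem.Chars.strip cs = [] ↔ ∀ c ∈ cs, PySem.Chars.isspace c = true := by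
  constructor
  · intro h c hc
    have hl : ∀ c ∈ List.dropWhile PySem.Chars.isspace cs, PySem.Chars.isspace c = true := by
      intro c hc
      have : (List.dropWhile PySem.Chars.isspace (List.dropWhile PySem.Chars.isspace cs).reverse).reverse = [] := h
      have h2 : List.dropWhile PySem.Chars.isspace (List.dropWhile PySem.Chars.isspace cs).reverse = [] := by
        simpa using congrArg List.reverse this
      rw [List.dropWhile_eq_nil_iff] at h2
      exact h2 c (by simpa using hc)
    rcases (List.mem_append.mp (by rw [List.takeWhile_append_dropWhile]; exact hc :
        c ∈ cs.takeWhile PySem.Chars.isspace ++ cs.dropWhile PySem.Chars.isspace)) with h1 | h1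
    · exact List.mem_takeWhile_imp h1
    · exact hl c h1
  · intro h
    have h1 : List.dropWhile PySem.Chars.isspace cs = [] :=
      List.dropWhile_eq_nil_iff.mpr h
    simp [PySem.Chars.strip, PySem.Chars.lstrip, PySem.Chars.rstrip, h1]

-- non-blank strings, phrased on the string side
theorem pvNB_iff (s : String) :
    PySem.Str.strip s ≠ "" ↔ ∃ c ∈ s.toList, PySem.Chars.isspace c = false := by
  simp only [ne_eq, ← String.toList_eq_nil_iff, PySem.Str.toList_strip, pvStrip_nil_iff]
  push Not
  simp

-- a joined segment led by a non-blank line is non-blank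
theorem pvNB_join (l : String) (g : List String) (h : PySem.Str.strip l ≠ "") :
    PySem.Str.strip (PySem.Str.join "\n" (l :: g)) ≠ "" := by
  rcases (pvNB_iff l).mp h with ⟨c, hc, hcs⟩
  apply (pvNB_iff _).mpr
  refine ⟨c, ?_, hcs⟩
  rw [PySem.Str.toList_join]
  have hpre : l.toList <+: PySem.Chars.join "\n".toList (List.map String.toList (l :: g)) := by
    cases g <;> simp [PySem.Chars.join, List.intercalate]
  exact hpre.mem hc

theorem pvNB_ne_empty (s : String) (h : PySem.Str.strip s ≠ "") : s.toList ≠ [] := by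
  rcases (pvNB_iff s).mp h with ⟨c, hc, _⟩
  intro hnil; rw [hnil] at hc; exact absurd hc (List.not_mem_nil)

theorem pvHeaderA_eq_not_indented (l : String) (h : l.toList ≠ []) :
    pvHeaderA l = !(pvIndented l) := by
  unfold pvHeaderA pvIndented
  cases hl : l.toList with
  | nil => exact absurd hl h
  | cons c t => simp [hl]

-- each group produced by pvGroups starts with a line of the input list
theorem pvGroups_shape (ls : List String) :
    ∀ G ∈ pvGroups ls, ∃ l g, G = l :: g ∧ l ∈ ls := by
  induction ls using pvGroups.induct with
  | case1 => simp [pvGroups]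
  | case2 l t ih =>
    intro G hG
    rw [pvGroups] at hG
    rcases List.mem_cons.mp hG with h | h
    · exact ⟨l, (pvSpan t).1, h, List.mem_cons_self⟩
    · rcases ih G h with ⟨l', g', hG', hl'⟩
      refine ⟨l', g', hG', List.mem_cons_of_mem _ ?_⟩
      rw [pvSpan_eq] at hl'
      exact List.IsSuffix.mem hl' (List.dropWhile_suffix pvIndented)

-- A's fold, characterised: classes so far ++ the segment absorbing the current indented run ++ grouped remainder
theorem pvFoldA (ls : List String) (cs cur : List String)
    (h : ∀ l ∈ ls, l.toList ≠ []) :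
    (let st := ls.foldl (fun (st : List String × List String) line =>
        if pvHeaderA line then (st.1 ++ [PySem.Str.join "\n" st.2], [line])
        else (st.1, st.2 ++ [line])) (cs, cur)
     st.1 ++ [PySem.Str.join "\n" st.2]) =
    cs ++ [PySem.Str.join "\n" (cur ++ ls.takeWhile pvIndented)]
       ++ (pvGroups (ls.dropWhile pvIndented)).map (fun g => PySem.Str.join "\n" g) := by
  induction ls generalizing cs cur with
  | nil => simp [pvGroups]
  | cons l t ih =>
    have hl := h l List.mem_cons_self
    have ht : ∀ x ∈ t, x.toList ≠ [] := fun x hx => h x (List.mem_cons_of_mem _ hx)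
    have hh := pvHeaderA_eq_not_indented l hl
    cases hi : pvIndented l with
    | true =>
      have hfa : pvHeaderA l = false := by rw [hh, hi]; rfl
      simp only [List.foldl_cons, hfa, Bool.false_eq_true, if_false]
      rw [ih _ _ ht]
      simp [hi]
    | false =>
      have hfa : pvHeaderA l = true := by rw [hh, hi]; rfl
      simp only [List.foldl_cons, hfa, if_true]
      rw [ih _ _ ht]
      simp only [List.takeWhile_cons, List.dropWhile_cons, hi, Bool.false_eq_true, if_false]
      rw [pvGroups_cons, pvSpan_eq]
      simp

-- the whole pipeline, on an arbitrary list of non-blank lines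
theorem pvMain (lines : List String)
    (hNB : ∀ l ∈ lines, PySem.Str.strip l ≠ "") :
    (let st := lines.foldl (fun (st : List String × List String) line =>
        if pvHeaderA line then (st.1 ++ [PySem.Str.join "\n" st.2], [line])
        else (st.1, st.2 ++ [line])) ([], [])
     (st.1 ++ [PySem.Str.join "\n" st.2]).filter (fun x => decide (PySem.Str.strip x ≠ ""))) =
    ((if (pvSpan lines).1.isEmpty then [] else [(pvSpan lines).1]) ++ pvGroups (pvSpan lines).2).map
      (fun g => PySem.Str.join "\n" g) := by
  have hne : ∀ l ∈ lines, l.toList ≠ [] := fun l hl => pvNB_ne_empty l (hNB l hl)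
  simp only []
  rw [pvFoldA lines [] [] hne]
  rw [pvSpan_eq]
  simp only [List.nil_append, List.filter_append, List.map_append]
  congr 1
  · -- head segment
    cases htw : lines.takeWhile pvIndented with
    | nil =>
      simp [PySem.Str.join, PySem.Chars.join, List.intercalate]
      decide
    | cons h t =>
      have hmem : h ∈ lines := List.IsPrefix.mem (by rw [htw]; exact List.mem_cons_self) (List.takeWhile_prefix pvIndented)
      have : PySem.Str.strip (PySem.Str.join "\n" (h :: t)) ≠ "" := pvNB_join h t (hNB h hmem)
      simp [this]
  · -- grouped remainder: every joined group is non-blank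
    rw [List.filter_eq_self.mpr]
    intro x hx
    rcases List.mem_map.mp hx with ⟨G, hG, rfl⟩
    rcases pvGroups_shape _ G hG with ⟨l, g, rfl, hl⟩
    have hlm : l ∈ lines := List.IsSuffix.mem hl (List.dropWhile_suffix pvIndented)
    simpa using pvNB_join l g (hNB l hlm)

-- ===== VERDICT (by name: the statement is the Claim_ definition above) =====
theorem splitClasses_spec : Claim_equal_splitClasses := by
  intro file _
  unfold Spec_splitClasses splitClasses splitClasses_alt
  apply pvMain
  intro l hl
  simpa using (List.of_mem_filter hl)
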